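-- pv_equiv track=rewrite | github.com/darkshoxx/AdventOfCode | 2024/9/hello_world/python_hack.py | find_first_dot_streak_before
-- ===== SOURCE A (Python) =====
-- def find_first_dot_streak_before(my_list, length, before):
--     current_streak = 0
--     for index, entry in enumerate(my_list):
--         if index > before:
--             return None
--         if entry == ".":
--             current_streak += 1
--             if current_streak == length:
--                 return index - length + 1
--         else:
--             current_streak = 0
--     return None
-- ===== SOURCE B (Python) =====
-- def find_first_dot_streak_before(my_list, length, before):
--     # Run-length decomposition: scan maximal runs of equal entries; answer is the
--     # start of the first "." run long enough whose length-th cell ends at <= before.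
--     if length <= 0:
--         return None
--     pos = 0
--     rest = my_list
--     while rest:
--         v = rest[0]
--         k = 1
--         while k < len(rest) and rest[k] == v:
--             k += 1
--         if v == "." and k >= length and pos + length - 1 <= before:
--             return pos
--         pos += k
--         rest = rest[k:]
--     return None
-- ===== Notes on version B (the rewrite author's own statement) =====
-- stated objective: alternative
-- what changed: Replaces A's per-element streak counter with a run-length decomposition: B enumerates maximal runs of equal entries and returns the start of the first '.'-run of size >= length whose length-th cell lies at index <= before (guarding length <= 0, where no streak can complete).
import Mathlib
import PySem

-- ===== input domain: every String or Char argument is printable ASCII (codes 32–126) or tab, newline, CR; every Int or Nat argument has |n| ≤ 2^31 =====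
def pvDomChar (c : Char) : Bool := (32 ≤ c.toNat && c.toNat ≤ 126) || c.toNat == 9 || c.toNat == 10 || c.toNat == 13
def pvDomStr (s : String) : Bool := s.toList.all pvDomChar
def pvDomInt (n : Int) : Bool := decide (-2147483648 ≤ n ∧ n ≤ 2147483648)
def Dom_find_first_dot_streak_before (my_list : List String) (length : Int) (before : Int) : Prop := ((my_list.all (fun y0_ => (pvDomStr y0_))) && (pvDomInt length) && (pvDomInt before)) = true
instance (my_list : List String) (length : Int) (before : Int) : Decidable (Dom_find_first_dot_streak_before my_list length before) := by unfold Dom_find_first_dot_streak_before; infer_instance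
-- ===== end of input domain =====

-- ===== PORT A =====
-- B re-implements A by run-length decomposition instead of a per-element streak counter (alternative decomposition, same cost).
-- loop of A: walk the list with an index and a streak counter of consecutive "." entries
def pvALoop (xs : List String) (length before index streak : Int) : Option Int :=
  match xs with
  | [] => none
  | entry :: rest =>
    if before < index then none
    else if entry = "." then
      (if streak + 1 = length then some (index - length + 1)
       else pvALoop rest length before (index + 1) (streak + 1))
    else pvALoop rest length before (index + 1) 0

def find_first_dot_streak_before (my_list : List String) (length : Int) (before : Int) : Option Int :=
  pvALoop my_list length before 0 0

-- ===== PORT B =====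
-- inner while of B: number of further leading entries of xs equal to v
def pvRunLen (v : String) (xs : List String) : Nat :=
  match xs with
  | [] => 0
  | x :: t => if x = v then pvRunLen v t + 1 else 0

-- outer while of B: consume one maximal run per step
def pvBLoop (length before pos : Int) (rest : List String) : Option Int :=
  match rest with
  | [] => none
  | v :: t =>
    -- k = 1 + pvRunLen v t  (size of the maximal run starting at v)
    if v = "." ∧ length ≤ 1 + (pvRunLen v t : Int) ∧ pos + length - 1 ≤ before then some pos
    else pvBLoop length before (pos + (1 + (pvRunLen v t : Int))) (t.drop (pvRunLen v t))
termination_by rest.length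
decreasing_by simp only [List.length_drop, List.length_cons]; omega

def find_first_dot_streak_before_alt (my_list : List String) (length : Int) (before : Int) : Option Int :=
  if length ≤ 0 then none else pvBLoop length before 0 my_list

-- ===== PRECONDITION & SPEC =====
def Spec_find_first_dot_streak_before (my_list : List String) (length : Int) (before : Int) (out : Option Int) : Prop := out = find_first_dot_streak_before_alt my_list length before
instance (my_list : List String) (length : Int) (before : Int) (out : Option Int) : Decidable (Spec_find_first_dot_streak_before my_list length before out) := by unfold Spec_find_first_dot_streak_before; infer_instance

-- ===== CLAIM (what is proved, stated in full; the proofs are below) =====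
def Claim_equal_find_first_dot_streak_before : Prop := ∀ (my_list : List String) (length : Int) (before : Int), Dom_find_first_dot_streak_before my_list length before → Spec_find_first_dot_streak_before my_list length before (find_first_dot_streak_before my_list length before)

-- ===== LEMMAS AND PROOFS =====

def pvHeadNe (v : String) : List String → Prop
  | [] => True
  | x :: _ => x ≠ v

lemma pvRunLen_le (v : String) : ∀ (t : List String), pvRunLen v t ≤ t.length := by
  intro t
  induction t with
  | nil => simp [pvRunLen]
  | cons x t ih =>
    simp only [pvRunLen, List.length_cons]
    split_ifs <;> omega

lemma pvRunLen_take (v : String) : ∀ (t : List String), ∀ x ∈ t.take (pvRunLen v t), x = v := by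
  intro t
  induction t with
  | nil => simp [pvRunLen]
  | cons x t ih =>
    simp only [pvRunLen]
    split_ifs with h
    · simp only [List.take_succ_cons, List.mem_cons]
      rintro y (rfl | hy)
      · exact h
      · exact ih y hy
    · simp

lemma pvRunLen_drop (v : String) : ∀ (t : List String), pvHeadNe v (t.drop (pvRunLen v t)) := by
  intro t
  induction t with
  | nil => simp [pvRunLen, pvHeadNe]
  | cons x t ih =>
    simp only [pvRunLen]
    split_ifs with h
    · simpa using ih
    · simpa [pvHeadNe] using h

lemma pvALoop_neg (L B : Int) (hL : L ≤ 0) :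
    ∀ (xs : List String) (p s : Int), 0 ≤ s → pvALoop xs L B p s = none := by
  intro xs
  induction xs with
  | nil => intro p s _; simp [pvALoop]
  | cons e rest ih =>
    intro p s hs
    simp only [pvALoop]
    split_ifs with h1 h2 h3
    · rfl
    · exact absurd h3 (by omega)
    · exact ih (p + 1) (s + 1) (by omega)
    · exact ih (p + 1) 0 le_rfl

lemma pvBLoop_dead (L B : Int) (hL : 1 ≤ L) :
    ∀ (rest : List String) (p : Int), B < p → pvBLoop L B p rest = none := by
  suffices h : ∀ (n : Nat) (rest : List String), rest.length ≤ n → ∀ (p : Int), B < p →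
      pvBLoop L B p rest = none by
    intro rest p hp; exact h rest.length rest le_rfl p hp
  intro n
  induction n with
  | zero =>
    intro rest hlen p hp
    cases rest with
    | nil => simp [pvBLoop]
    | cons v t => simp at hlen
  | succ n ih =>
    intro rest hlen p hp
    cases rest with
    | nil => simp [pvBLoop]
    | cons v t =>
      simp only [pvBLoop]
      split_ifs with h
      · obtain ⟨-, -, h3⟩ := h; omega
      · have ht : t.length ≤ n := by simp only [List.length_cons] at hlen; omega
        exact ih _ (le_trans (by simp only [List.length_drop]; omega) ht) _ (by omega)

lemma pvALoop_dots (L B : Int) :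
    ∀ (r t' : List String) (p s : Int), (∀ x ∈ r, x = ".") → 0 ≤ s → s + 1 ≤ L →
    pvHeadNe "." t' →
    pvALoop (r ++ t') L B p s =
      if L ≤ s + (r.length : Int) then
        (if p + L - s - 1 ≤ B then some (p - s) else none)
      else if B < p + (r.length : Int) - 1 then none
      else pvALoop t' L B (p + (r.length : Int)) 0 := by
  intro r
  induction r with
  | nil =>
    intro t' p s hall hs hsl hne
    simp only [List.nil_append, List.length_nil, Nat.cast_zero, add_zero]
    rw [if_neg (show ¬ L ≤ s from by omega)]
    cases t' with
    | nil => simp [pvALoop]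
    | cons x ts =>
      have hx : x ≠ "." := hne
      simp only [pvALoop]
      rw [if_neg hx]
      split_ifs <;> first | rfl | omega
  | cons x r ih =>
    intro t' p s hall hs hsl hne
    have hx : x = "." := hall x (by simp)
    subst hx
    simp only [List.cons_append, pvALoop, List.length_cons]
    rw [if_pos (trivial : True)]
    push_cast
    by_cases hB : B < p
    · rw [if_pos hB]
      split_ifs <;> first | rfl | omega
    · rw [if_neg hB]
      by_cases hsL : s + 1 = L
      · rw [if_pos hsL]
        rw [if_pos (show L ≤ s + ((r.length : Int) + 1) from by omega),
            if_pos (show p + L - s - 1 ≤ B from by omega)]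
        exact congrArg some (by omega)
      · rw [if_neg hsL]
        rw [ih t' (p + 1) (s + 1) (fun y hy => hall y (List.mem_cons_of_mem _ hy))
            (by omega) (by omega) hne]
        rw [show p + 1 + (r.length : Int) = p + ((r.length : Int) + 1) from by ring]
        all_goals split_ifs <;> first | rfl | omega | (exact congrArg some (by omega))

lemma pvALoop_nondots (L B : Int) :
    ∀ (r t' : List String) (p : Int), (∀ x ∈ r, x ≠ ".") →
    pvALoop (r ++ t') L B p 0 =
      if B < p + (r.length : Int) - 1 then none
      else pvALoop t' L B (p + (r.length : Int)) 0 := by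
  intro r
  induction r with
  | nil =>
    intro t' p hall
    simp only [List.nil_append, List.length_nil, Nat.cast_zero, add_zero]
    cases t' with
    | nil => simp [pvALoop]
    | cons x ts =>
      simp only [pvALoop]
      split_ifs <;> first | rfl | omega
  | cons x r ih =>
    intro t' p hall
    have hx : x ≠ "." := hall x (by simp)
    simp only [List.cons_append, pvALoop, List.length_cons]
    rw [if_neg hx]
    push_cast
    by_cases hB : B < p
    · rw [if_pos hB, if_pos (show B < p + ((r.length : Int) + 1) - 1 from by omega)]
    · rw [if_neg hB]
      rw [ih t' (p + 1) (fun y hy => hall y (List.mem_cons_of_mem _ hy))]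
      rw [show p + 1 + (r.length : Int) = p + ((r.length : Int) + 1) from by ring]

lemma pvMain (L B : Int) (hL : 1 ≤ L) :
    ∀ (n : Nat) (rest : List String), rest.length ≤ n → ∀ (p : Int),
      pvALoop rest L B p 0 = pvBLoop L B p rest := by
  intro n
  induction n with
  | zero =>
    intro rest hlen p
    cases rest with
    | nil => simp [pvALoop, pvBLoop]
    | cons v t => simp at hlen
  | succ n ih =>
    intro rest hlen p
    cases rest with
    | nil => simp [pvALoop, pvBLoop]
    | cons v t =>
      have hml : pvRunLen v t ≤ t.length := pvRunLen_le v t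
      have htake : (t.take (pvRunLen v t)).length = pvRunLen v t := List.length_take_of_le hml
      have ht : t.length ≤ n := by simp only [List.length_cons] at hlen; omega
      have hdlen : (t.drop (pvRunLen v t)).length ≤ n :=
        le_trans (by simp only [List.length_drop]; omega) ht
      have hsplit : v :: t = (v :: t.take (pvRunLen v t)) ++ t.drop (pvRunLen v t) := by
        rw [List.cons_append, List.take_append_drop]
      by_cases hv : v = "."
      · subst hv
        have hall : ∀ x ∈ ("." : String) :: t.take (pvRunLen "." t), x = "." := by
          intro x hx
          rcases List.mem_cons.mp hx with rfl | hx
          · rfl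
          · exact pvRunLen_take "." t x hx
        conv_lhs => rw [hsplit]
        rw [pvALoop_dots L B _ _ p 0 hall le_rfl (by omega) (pvRunLen_drop "." t)]
        simp only [pvBLoop, List.length_cons, htake]
        push_cast
        by_cases h1 : L ≤ ((pvRunLen "." t : Int) + 1)
        · by_cases h2 : p + L - 1 ≤ B
          · rw [if_pos (by omega), if_pos (by omega),
                if_pos (show True ∧ L ≤ 1 + (pvRunLen "." t : Int) ∧ p + L - 1 ≤ B from
                  ⟨trivial, by omega, h2⟩)]
            exact congrArg some (by omega)
          · rw [if_pos (by omega), if_neg (by omega),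
                if_neg (show ¬(True ∧ L ≤ 1 + (pvRunLen "." t : Int) ∧
                  p + L - 1 ≤ B) from fun h => h2 h.2.2)]
            exact (pvBLoop_dead L B hL _ _ (by omega)).symm
        · rw [if_neg (by omega),
              if_neg (show ¬(True ∧ L ≤ 1 + (pvRunLen "." t : Int) ∧
                p + L - 1 ≤ B) from fun h => absurd h.2.1 (by omega))]
          by_cases h3 : B < p + ((pvRunLen "." t : Int) + 1) - 1
          · rw [if_pos h3]
            exact (pvBLoop_dead L B hL _ _ (by omega)).symm
          · rw [if_neg h3]
            rw [show p + ((pvRunLen "." t : Int) + 1) = p + (1 + (pvRunLen "." t : Int))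
                from by ring]
            exact ih _ hdlen _
      · have hall : ∀ x ∈ v :: t.take (pvRunLen v t), x ≠ "." := by
          intro x hx
          rcases List.mem_cons.mp hx with rfl | hx
          · exact hv
          · rw [pvRunLen_take v t x hx]; exact hv
        conv_lhs => rw [hsplit]
        rw [pvALoop_nondots L B _ _ p hall]
        simp only [pvBLoop, List.length_cons, htake]
        rw [if_neg (show ¬(v = "." ∧ L ≤ 1 + (pvRunLen v t : Int) ∧ p + L - 1 ≤ B)
            from fun h => hv h.1)]
        push_cast
        by_cases h3 : B < p + ((pvRunLen v t : Int) + 1) - 1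
        · rw [if_pos h3]
          exact (pvBLoop_dead L B hL _ _ (by omega)).symm
        · rw [if_neg h3]
          rw [show p + ((pvRunLen v t : Int) + 1) = p + (1 + (pvRunLen v t : Int))
              from by ring]
          exact ih _ hdlen _

-- ===== VERDICT (by name: the statement is the Claim_ definition above) =====
theorem find_first_dot_streak_before_spec : Claim_equal_find_first_dot_streak_before := by
  intro my_list L B _
  unfold Spec_find_first_dot_streak_before find_first_dot_streak_before
    find_first_dot_streak_before_alt
  by_cases h : L ≤ 0
  · rw [if_pos h]
    exact pvALoop_neg L B h my_list 0 0 le_rfl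
  · rw [if_neg h]
    exact pvMain L B (by omega) my_list.length my_list le_rfl 0
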